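-- pv_equiv track=rewrite | github.com/AmyTreloar/ProgrammingAtHawker | 2017-2019/Python/Scratchpad/100ml/q5.py | check_for_no_banned_combos
-- ===== SOURCE A (Python) =====
-- def check_for_no_banned_combos(string_in):
--     banned = ['ab', 'cd', 'pq', 'xy']
--     count = 0
--     for b in banned:
--         count += string_in.count(b)
--         if count>= 1:
--             return False
--     return True
-- ===== SOURCE B (Python) =====
-- def check_for_no_banned_combos(string_in):
--     banned = {'ab', 'cd', 'pq', 'xy'}
--     for a, b in zip(string_in, string_in[1:]):
--         if a + b in banned:
--             return False
--     return True
-- ===== Notes on version B (the rewrite author's own statement) =====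
-- stated objective: idiomatic
-- what changed: Replaces four separate str.count scans (accumulated into a counter with an early-out) by one left-to-right pass over adjacent character pairs, returning False on the first banned pair.
import Mathlib
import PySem

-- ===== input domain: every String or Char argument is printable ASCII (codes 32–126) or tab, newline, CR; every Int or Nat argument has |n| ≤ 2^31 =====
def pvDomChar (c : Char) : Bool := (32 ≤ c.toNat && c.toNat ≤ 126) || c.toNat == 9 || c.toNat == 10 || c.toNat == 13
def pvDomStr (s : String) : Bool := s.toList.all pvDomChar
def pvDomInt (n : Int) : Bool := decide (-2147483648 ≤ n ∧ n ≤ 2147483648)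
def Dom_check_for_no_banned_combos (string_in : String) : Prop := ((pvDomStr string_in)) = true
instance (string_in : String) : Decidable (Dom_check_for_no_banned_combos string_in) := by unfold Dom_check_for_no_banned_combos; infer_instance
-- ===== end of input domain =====

-- B makes one pass over adjacent character pairs instead of A's four full str.count scans (idiomatic; same asymptotic cost).

-- ===== PORT A =====
-- A's loop over the banned list, accumulating `count` with an early return.
def pvALoop (s : String) : List String → Int → Bool
  | [], _ => true
  | b :: rest, count =>
    let count := count + (PySem.Str.count s b : Int)
    if count ≥ 1 then false else pvALoop s rest count

def check_for_no_banned_combos (string_in : String) : Bool :=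
  pvALoop string_in ["ab", "cd", "pq", "xy"] 0

-- ===== PORT B =====
-- B's single pass: zip(s, s[1:]) = walking adjacent pairs of s.toList.
def pvBLoop : List Char → Bool
  | a :: b :: rest =>
    if [a, b] ∈ [['a','b'], ['c','d'], ['p','q'], ['x','y']] then false
    else pvBLoop (b :: rest)
  | _ => true

def check_for_no_banned_combos_alt (string_in : String) : Bool :=
  pvBLoop string_in.toList

-- ===== PRECONDITION & SPEC =====
def Spec_check_for_no_banned_combos (string_in : String) (out : Bool) : Prop := out = check_for_no_banned_combos_alt string_in
instance (string_in : String) (out : Bool) : Decidable (Spec_check_for_no_banned_combos string_in out) := by unfold Spec_check_for_no_banned_combos; infer_instance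

-- ===== CLAIM (what is proved, stated in full; the proofs are below) =====
def Claim_equal_check_for_no_banned_combos : Prop := ∀ (string_in : String), Dom_check_for_no_banned_combos string_in → Spec_check_for_no_banned_combos string_in (check_for_no_banned_combos string_in)

-- ===== LEMMAS AND PROOFS =====

theorem pv_go_le (sub : List Char) (fuel : ℕ) (l : List Char) (acc : ℕ) :
    acc ≤ PySem.Chars.count.go sub fuel l acc := by
  induction fuel generalizing l acc with
  | zero => simp [PySem.Chars.count.go]
  | succ fuel ih =>
    cases l with
    | nil => simp [PySem.Chars.count.go]
    | cons h t =>
      rw [PySem.Chars.count.go]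
      split
      · exact le_trans (Nat.le_succ acc) (ih _ _)
      · exact ih _ _

theorem pv_go_eq_iff (sub : List Char) (hsub : sub ≠ []) (fuel : ℕ) (l : List Char)
    (hl : l.length ≤ fuel) (acc : ℕ) :
    (PySem.Chars.count.go sub fuel l acc = acc ↔ ¬ sub <:+: l) := by
  induction fuel generalizing l acc with
  | zero =>
    have : l = [] := by cases l <;> simp_all
    subst this
    simp [PySem.Chars.count.go, List.infix_iff_prefix_suffix]
    simp_all
  | succ fuel ih =>
    cases l with
    | nil =>
      simp [PySem.Chars.count.go, List.infix_iff_prefix_suffix]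
      simp_all
    | cons h t =>
      rw [PySem.Chars.count.go]
      split
      · rename_i hp
        have h1 : acc + 1 ≤ PySem.Chars.count.go sub fuel (List.drop sub.length (h :: t)) (acc + 1) :=
          pv_go_le _ _ _ _
      -- prefix found → result > acc and sub is an infix
        constructor
        · intro he; omega
        · intro hni
          exact absurd ((List.IsPrefix.isInfix (List.isPrefixOf_iff_prefix.mp hp))) hni
      · rename_i hp
        have ht : t.length ≤ fuel := by simpa using Nat.le_of_succ_le_succ (by simpa using hl)
        rw [ih t ht acc, List.infix_cons_iff]
        simp [List.isPrefixOf_iff_prefix] at hp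
        simp [hp]

theorem pv_count_zero_iff (s sub : List Char) (hsub : sub ≠ []) :
    (PySem.Chars.count s sub = 0 ↔ ¬ sub <:+: s) := by
  rw [PySem.Chars.count]
  simp only [List.isEmpty_iff, hsub]
  simpa using pv_go_eq_iff sub hsub s.length s le_rfl 0

theorem pv_str_count_zero_iff (s : String) (sub : String) (hsub : sub.toList ≠ []) :
    (PySem.Str.count s sub = 0 ↔ ¬ sub.toList <:+: s.toList) := by
  rw [PySem.Str.count_eq]
  exact pv_count_zero_iff _ _ hsub

-- A = true iff none of the four patterns occurs.
theorem pv_A_iff (s : String) :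
    (check_for_no_banned_combos s = true ↔
      (¬ ['a','b'] <:+: s.toList ∧ ¬ ['c','d'] <:+: s.toList ∧
       ¬ ['p','q'] <:+: s.toList ∧ ¬ ['x','y'] <:+: s.toList)) := by
  have hab := pv_str_count_zero_iff s "ab" (by decide)
  have hcd := pv_str_count_zero_iff s "cd" (by decide)
  have hpq := pv_str_count_zero_iff s "pq" (by decide)
  have hxy := pv_str_count_zero_iff s "xy" (by decide)
  unfold check_for_no_banned_combos
  simp only [pvALoop]
  split_ifs with h1 h2 h3 h4
  · constructor
    · intro h; cases h
    · intro ⟨a, _⟩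
      exact absurd (hab.mpr a) (by omega)
  · constructor
    · intro h; cases h
    · intro ⟨_, c, _⟩
      exact absurd (hcd.mpr c) (by omega)
  · constructor
    · intro h; cases h
    · intro ⟨_, _, p, _⟩
      exact absurd (hpq.mpr p) (by omega)
  · constructor
    · intro h; cases h
    · intro ⟨_, _, _, x⟩
      exact absurd (hxy.mpr x) (by omega)
  · constructor
    · intro _
      refine ⟨?_, ?_, ?_, ?_⟩
      · exact hab.mp (by omega)
      · exact hcd.mp (by omega)
      · exact hpq.mp (by omega)
      · exact hxy.mp (by omega)
    · intro _; rfl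

-- B = true iff none of the four patterns occurs, by induction over the pair walk.
theorem pv_B_iff (cs : List Char) :
    (pvBLoop cs = true ↔
      (¬ ['a','b'] <:+: cs ∧ ¬ ['c','d'] <:+: cs ∧
       ¬ ['p','q'] <:+: cs ∧ ¬ ['x','y'] <:+: cs)) := by
  induction cs with
  | nil => simp [pvBLoop]
  | cons a t ih =>
    cases t with
    | nil =>
      simp only [pvBLoop]
      constructor
      · intro _
        refine ⟨?_, ?_, ?_, ?_⟩ <;>
          · intro h
            have := h.length_le
            simp at this
      · intro _; trivial
    | cons b rest =>
      simp only [pvBLoop]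
      have hpre : ∀ x y : Char, ([x, y] <+: a :: b :: rest) ↔ (x = a ∧ y = b) := by
        intro x y
        constructor
        · intro h
          rcases h with ⟨ts, hts⟩
          simp at hts
          exact ⟨hts.1, hts.2.1⟩
        · rintro ⟨rfl, rfl⟩
          exact ⟨rest, rfl⟩
      split_ifs with hb
      · simp only [false_iff]
        intro ⟨h1, h2, h3, h4⟩
        simp only [List.mem_cons, List.not_mem_nil, or_false] at hb
        rcases hb with h | h | h | h <;>
          [exact h1 (h ▸ (hpre a b).mpr ⟨rfl, rfl⟩ |>.isInfix);
           exact h2 (h ▸ (hpre a b).mpr ⟨rfl, rfl⟩ |>.isInfix);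
           exact h3 (h ▸ (hpre a b).mpr ⟨rfl, rfl⟩ |>.isInfix);
           exact h4 (h ▸ (hpre a b).mpr ⟨rfl, rfl⟩ |>.isInfix)]
      · rw [ih]
        simp only [List.mem_cons, List.not_mem_nil, or_false] at hb
        push Not at hb
        constructor
        · intro ⟨h1, h2, h3, h4⟩
          refine ⟨?_, ?_, ?_, ?_⟩ <;>
            · rw [List.infix_cons_iff]
              rintro (hp | hi)
              · rcases (hpre _ _).mp hp with ⟨rfl, rfl⟩
                first | exact hb.1 rfl | exact hb.2.1 rfl
                      | exact hb.2.2.1 rfl | exact hb.2.2.2 rfl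
              · first | exact h1 hi | exact h2 hi | exact h3 hi | exact h4 hi
        · intro ⟨h1, h2, h3, h4⟩
          exact ⟨fun h => h1 (List.infix_cons_iff.mpr (Or.inr h)),
                 fun h => h2 (List.infix_cons_iff.mpr (Or.inr h)),
                 fun h => h3 (List.infix_cons_iff.mpr (Or.inr h)),
                 fun h => h4 (List.infix_cons_iff.mpr (Or.inr h))⟩

-- ===== VERDICT (by name: the statement is the Claim_ definition above) =====
theorem check_for_no_banned_combos_spec : Claim_equal_check_for_no_banned_combos := by
  intro s _
  unfold Spec_check_for_no_banned_combos check_for_no_banned_combos_alt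
  have hA := pv_A_iff s
  have hB := pv_B_iff s.toList
  rcases h : pvBLoop s.toList with _ | _
  · rw [← Bool.not_eq_true]
    rw [hA, ← hB, h]
    simp
  · exact hA.mpr (hB.mp h)
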